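-- pv_equiv track=rewrite | github.com/haris18s/Algorithms_Standford | Course3_Greedy_MST_DP/Project_clustering_week2/Week_2_Geedy_Algo_Stanf_Clustering.py | sort_edges
-- ===== SOURCE A (Python) =====
-- def merge_sort(edges):
--     """Sort edges using merge sort.
--
--     Args:
--         edges (list): List of edges as tuples (node1, node2, cost).
--
--     Returns:
--         list: Sorted list of edges by cost in ascending order.
--     """
--
--     if len(edges) <= 1:
--         return edges
--     mid = len(edges) // 2
--     left_half = merge_sort(edges[:mid])
--     right_half = merge_sort(edges[mid:])
--
--     return merge(left_half, right_half)
--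
-- def merge(left, right):
--
--     """Merge two sorted lists of edges into one sorted list.
--
--     Args:
--         left (list): First sorted list of edges.
--         right (list): Second sorted list of edges.
--
--     Returns:
--         list: Merged sorted list of edges.
--     """
--     sorted_edges = []
--     i = j = 0
--
--     while i < len(left) and j <len(right):
--         if left[i][2] <= right[j][2]:
--             sorted_edges.append(left[i])
--             i +=1
--         else:
--             sorted_edges.append(right[j])
--             j +=1
--
--     sorted_edges.extend(left[i:])
--     sorted_edges.extend((right[j:]))
--
--     return sorted_edges
--
-- def sort_edges(adj_List):
--     """Extract and sort edges from the adjacency list.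
--
--     Args:
--         adj_list (dict): Adjacency list representation of the graph.
--
--     Returns:
--         list: Sorted list of edges as tuples (node1, node2, cost).
--     """
--     edges = []
--     for k, v in adj_List.items():
--         for neighbor, cost in v :
--             #avoid double counting edges
--             if k < neighbor:
--                 edges.append((k,neighbor, cost))
--
--     #perfrom selection sort in edges
--     #sort_edges  = selection_sort(edges)
--
--     #sort edges using merge_sort
--     sorted_edges =  merge_sort(edges)
--     return sorted_edges
-- ===== SOURCE B (Python) =====
-- def sort_edges(adj_List):
--     """Extract undirected edges (k < neighbor) and sort them by cost.
--
--     Same extraction as A, but the hand-written recursive merge sort is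
--     replaced by Python's built-in stable sort keyed on the cost."""
--     edges = [(k, neighbor, cost)
--              for k, v in adj_List.items()
--              for neighbor, cost in v
--              if k < neighbor]
--     return sorted(edges, key=lambda e: e[2])
-- ===== Notes on version B (the rewrite author's own statement) =====
-- stated objective: idiomatic
-- what changed: The hand-written recursive merge_sort/merge machinery is replaced by one comprehension plus Python's built-in stable sort keyed on the cost (Timsort), whose tie order matches A's left-biased <= merge.
import Mathlib
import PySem

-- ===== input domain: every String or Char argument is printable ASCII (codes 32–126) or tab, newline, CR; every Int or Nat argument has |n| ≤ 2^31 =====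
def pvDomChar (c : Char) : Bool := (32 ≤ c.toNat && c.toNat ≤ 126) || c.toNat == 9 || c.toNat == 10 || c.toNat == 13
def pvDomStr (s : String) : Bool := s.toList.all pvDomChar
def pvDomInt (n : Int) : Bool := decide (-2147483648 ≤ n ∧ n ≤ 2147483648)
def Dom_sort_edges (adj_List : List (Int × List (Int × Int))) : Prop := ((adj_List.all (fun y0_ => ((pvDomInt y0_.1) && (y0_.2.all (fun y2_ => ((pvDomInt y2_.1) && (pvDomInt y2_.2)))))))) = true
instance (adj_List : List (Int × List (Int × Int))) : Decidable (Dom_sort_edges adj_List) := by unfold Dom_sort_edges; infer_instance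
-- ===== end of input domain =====

-- B replaces A's hand-written recursive merge sort by the built-in stable sort keyed on the cost (idiomatic; same asymptotics).

-- ===== PORT A =====

-- merge(left, right): the while loop picks the smaller-cost head (left first on ties), then extends with the rests
def pyMerge : List (Int × Int × Int) → List (Int × Int × Int) → List (Int × Int × Int)
  | [], right => right                     -- loop exits with i = len(left): sorted_edges ++ right[j:]
  | left, [] => left                       -- loop exits with j = len(right): sorted_edges ++ left[i:]
  | a :: left, b :: right =>
      if a.2.2 ≤ b.2.2 then a :: pyMerge left (b :: right)
      else b :: pyMerge (a :: left) right

-- merge_sort(edges); len(edges)//2 on the nonnegative length is exactly Nat division, and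
-- edges[:mid] / edges[mid:] with 0 ≤ mid ≤ len(edges) are exactly take/drop.
-- The fuel argument (≥ list length at every call) only makes the recursion structural; it never changes the computation.
def pyMergeSortF : Nat → List (Int × Int × Int) → List (Int × Int × Int)
  | 0, edges => edges
  | Nat.succ fuel, edges =>
    if edges.length ≤ 1 then edges
    else
      let mid := edges.length / 2
      pyMerge (pyMergeSortF fuel (edges.take mid)) (pyMergeSortF fuel (edges.drop mid))

def pyMergeSort (edges : List (Int × Int × Int)) : List (Int × Int × Int) :=
  pyMergeSortF edges.length edges

def sort_edges (adj_List : List (Int × List (Int × Int))) : List (Int × Int × Int) :=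
  let edges := adj_List.foldl (fun edges kv =>
    kv.2.foldl (fun edges nc =>
      if kv.1 < nc.1 then edges ++ [(kv.1, nc.1, nc.2)] else edges) edges) []
  pyMergeSort edges

-- ===== PORT B =====
def sort_edges_alt (adj_List : List (Int × List (Int × Int))) : List (Int × Int × Int) :=
  let edges := adj_List.flatMap (fun kv =>
    kv.2.filterMap (fun nc =>
      if kv.1 < nc.1 then some (kv.1, nc.1, nc.2) else none))
  PySem.List.sorted edges (fun e => e.2.2) false

-- ===== PRECONDITION & SPEC =====
def Spec_sort_edges (adj_List : List (Int × List (Int × Int))) (out : List (Int × Int × Int)) : Prop := out = sort_edges_alt adj_List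
instance (adj_List : List (Int × List (Int × Int))) (out : List (Int × Int × Int)) : Decidable (Spec_sort_edges adj_List out) := by unfold Spec_sort_edges; infer_instance

-- ===== CLAIM (what is proved, stated in full; the proofs are below) =====
def Claim_equal_sort_edges : Prop := ∀ (adj_List : List (Int × List (Int × Int))), Dom_sort_edges adj_List → Spec_sort_edges adj_List (sort_edges adj_List)

-- ===== LEMMAS AND PROOFS =====

-- the cost key and the per-cost filter predicate
def pvKey (e : Int × Int × Int) : Int := e.2.2
def pvPk (k : Int) (e : Int × Int × Int) : Bool := decide (pvKey e = k)

-- both extractions build the same edge list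
theorem inner_extract_eq (k : Int) (v : List (Int × Int)) (init : List (Int × Int × Int)) :
    v.foldl (fun edges nc => if k < nc.1 then edges ++ [(k, nc.1, nc.2)] else edges) init
    = init ++ v.filterMap (fun nc => if k < nc.1 then some (k, nc.1, nc.2) else none) := by
  induction v generalizing init with
  | nil => simp
  | cons nc t ih => by_cases h : k < nc.1 <;> simp [h, ih]

theorem extract_eq (adj_List : List (Int × List (Int × Int))) (init : List (Int × Int × Int)) :
    adj_List.foldl (fun edges kv =>
      kv.2.foldl (fun edges nc =>
        if kv.1 < nc.1 then edges ++ [(kv.1, nc.1, nc.2)] else edges) edges) init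
    = init ++ adj_List.flatMap (fun kv =>
        kv.2.filterMap (fun nc =>
          if kv.1 < nc.1 then some (kv.1, nc.1, nc.2) else none)) := by
  induction adj_List generalizing init with
  | nil => simp
  | cons kv tl ih =>
    simp only [List.foldl_cons]
    rw [inner_extract_eq, ih, List.flatMap_cons, List.append_assoc]

-- membership in a merge
theorem mem_pyMerge (y : Int × Int × Int) (l r : List (Int × Int × Int)) :
    y ∈ pyMerge l r ↔ y ∈ l ∨ y ∈ r := by
  fun_induction pyMerge l r with
  | case1 r => simp
  | case2 l h => simp
  | case3 a l b r hle ih => simp only [List.mem_cons, ih]; tauto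
  | case4 a l b r hgt ih => simp only [List.mem_cons, ih]; tauto

-- pyMerge preserves key-sortedness
theorem pairwise_pyMerge (l r : List (Int × Int × Int))
    (hl : l.Pairwise (fun a b => pvKey a ≤ pvKey b)) (hr : r.Pairwise (fun a b => pvKey a ≤ pvKey b)) :
    (pyMerge l r).Pairwise (fun a b => pvKey a ≤ pvKey b) := by
  fun_induction pyMerge l r with
  | case1 r => exact hr
  | case2 l h => exact hl
  | case3 a l b r hle ih =>
    have hla := (List.pairwise_cons.mp hl).1
    have hrb := (List.pairwise_cons.mp hr).1
    refine List.pairwise_cons.mpr ⟨?_, ih (List.pairwise_cons.mp hl).2 hr⟩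
    intro y hy
    rcases (mem_pyMerge y l (b :: r)).mp hy with h | h
    · exact hla y h
    · rcases List.mem_cons.mp h with rfl | h
      · exact hle
      · exact le_trans hle (hrb y h)
  | case4 a l b r hgt ih =>
    have hla := (List.pairwise_cons.mp hl).1
    have hrb := (List.pairwise_cons.mp hr).1
    have hba : pvKey b ≤ pvKey a := le_of_lt (lt_of_not_ge hgt)
    refine List.pairwise_cons.mpr ⟨?_, ih hl (List.pairwise_cons.mp hr).2⟩
    intro y hy
    rcases (mem_pyMerge y (a :: l) r).mp hy with h | h
    · rcases List.mem_cons.mp h with rfl | h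
      · exact hba
      · exact le_trans hba (hla y h)
    · exact hrb y h

-- filter of a per-cost class commutes with pyMerge, left part first
theorem filter_pyMerge (k : Int) (l r : List (Int × Int × Int))
    (hl : l.Pairwise (fun a b => pvKey a ≤ pvKey b)) :
    (pyMerge l r).filter (pvPk k) = l.filter (pvPk k) ++ r.filter (pvPk k) := by
  fun_induction pyMerge l r with
  | case1 r => simp
  | case2 l h => simp
  | case3 a l b r hle ih =>
    have := ih (List.pairwise_cons.mp hl).2
    by_cases hpa : pvPk k a = true <;> simp [hpa, this]
  | case4 a l b r hgt ih =>
    have hIH := ih hl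
    by_cases hpb : pvPk k b = true
    · have hk : pvKey b = k := by unfold pvPk at hpb; exact of_decide_eq_true hpb
      have hnil : (a :: l).filter (pvPk k) = [] := by
        rw [List.filter_eq_nil_iff]
        intro e he
        have hae : pvKey a ≤ pvKey e := by
          rcases List.mem_cons.mp he with rfl | h
          · exact le_refl _
          · exact (List.pairwise_cons.mp hl).1 e h
        unfold pvPk
        simp only [decide_eq_true_eq]
        have : pvKey b < pvKey a := lt_of_not_ge hgt
        omega
      simp [hpb, hIH, hnil]
    · simp [hpb, hIH]

-- a list of length ≤ 1 is trivially pairwise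
theorem pairwise_of_len_le_one (xs : List (Int × Int × Int)) (h : xs.length ≤ 1) :
    xs.Pairwise (fun a b => pvKey a ≤ pvKey b) := by
  match xs with
  | [] => simp
  | [x] => simp
  | x :: y :: t => simp at h

-- pyMergeSort output is key-sorted
theorem pairwise_pyMergeSortF (fuel : Nat) (xs : List (Int × Int × Int)) (h : xs.length ≤ fuel) :
    (pyMergeSortF fuel xs).Pairwise (fun a b => pvKey a ≤ pvKey b) := by
  induction fuel generalizing xs with
  | zero =>
    have : xs = [] := List.length_eq_zero_iff.mp (Nat.le_zero.mp h)
    subst this; simp [pyMergeSortF]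
  | succ fuel ih =>
    rw [pyMergeSortF]
    by_cases h1 : xs.length ≤ 1
    · rw [if_pos h1]; exact pairwise_of_len_le_one xs h1
    · rw [if_neg h1]
      exact pairwise_pyMerge _ _
        (ih _ (by simp only [List.length_take]; omega))
        (ih _ (by simp only [List.length_drop]; omega))

theorem pairwise_pyMergeSort (xs : List (Int × Int × Int)) :
    (pyMergeSort xs).Pairwise (fun a b => pvKey a ≤ pvKey b) :=
  pairwise_pyMergeSortF xs.length xs (le_refl _)

-- pyMergeSort is stable classwise: each cost class is preserved
theorem filter_pyMergeSortF (k : Int) (fuel : Nat) (xs : List (Int × Int × Int))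
    (h : xs.length ≤ fuel) :
    (pyMergeSortF fuel xs).filter (pvPk k) = xs.filter (pvPk k) := by
  induction fuel generalizing xs with
  | zero => rfl
  | succ fuel ih =>
    rw [pyMergeSortF]
    by_cases h1 : xs.length ≤ 1
    · rw [if_pos h1]
    · rw [if_neg h1]
      rw [filter_pyMerge k _ _ (pairwise_pyMergeSortF _ _ (by simp only [List.length_take]; omega)),
        ih _ (by simp only [List.length_take]; omega),
        ih _ (by simp only [List.length_drop]; omega),
        ← List.filter_append, List.take_append_drop]

theorem filter_pyMergeSort (k : Int) (xs : List (Int × Int × Int)) :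
    (pyMergeSort xs).filter (pvPk k) = xs.filter (pvPk k) :=
  filter_pyMergeSortF k xs.length xs (le_refl _)

-- stable insertion of one element: its cost class gains x at the end
theorem filter_insertBy (k : Int) (x : Int × Int × Int) (acc : List (Int × Int × Int))
    (hacc : acc.Pairwise (fun a b => pvKey a ≤ pvKey b)) :
    (PySem.List.insertBy (fun a b => decide (pvKey a < pvKey b)) x acc).filter (pvPk k)
      = acc.filter (pvPk k) ++ (if pvPk k x then [x] else []) := by
  induction acc with
  | nil => by_cases hpx : pvPk k x = true <;> simp [PySem.List.insertBy, hpx]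
  | cons y t ih =>
    by_cases hxy : pvKey x < pvKey y
    · have heq : PySem.List.insertBy (fun a b => decide (pvKey a < pvKey b)) x (y :: t)
          = x :: y :: t := by simp [PySem.List.insertBy, hxy]
      rw [heq]
      by_cases hpx : pvPk k x = true
      · have hk : pvKey x = k := by unfold pvPk at hpx; exact of_decide_eq_true hpx
        have hnil : (y :: t).filter (pvPk k) = [] := by
          rw [List.filter_eq_nil_iff]
          intro e he
          have hye : pvKey y ≤ pvKey e := by
            rcases List.mem_cons.mp he with rfl | h
            · exact le_refl _
            · exact (List.pairwise_cons.mp hacc).1 e h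
          unfold pvPk
          simp only [decide_eq_true_eq]
          omega
        simp [hpx, hnil]
      · simp [hpx]
    · have heq : PySem.List.insertBy (fun a b => decide (pvKey a < pvKey b)) x (y :: t)
          = y :: PySem.List.insertBy (fun a b => decide (pvKey a < pvKey b)) x t := by
        simp [PySem.List.insertBy, hxy]
      rw [heq]
      have := ih (List.pairwise_cons.mp hacc).2
      by_cases hpy : pvPk k y = true <;> simp [hpy, this]

-- stability of PySem.List.sorted: each cost class is preserved
theorem filter_sorted (k : Int) (xs : List (Int × Int × Int)) :
    (PySem.List.sorted xs pvKey false).filter (pvPk k) = xs.filter (pvPk k) := by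
  induction xs using List.reverseRecOn with
  | nil => rfl
  | append_singleton t x ih =>
    have hstep : PySem.List.sorted (t ++ [x]) pvKey false
        = PySem.List.insertBy (fun a b => decide (pvKey a < pvKey b)) x
            (PySem.List.sorted t pvKey false) := by
      rw [PySem.List.sorted_eq_foldl_insertBy, PySem.List.sorted_eq_foldl_insertBy,
        List.foldl_append, List.foldl_cons, List.foldl_nil]
    rw [hstep, filter_insertBy k x _ (PySem.List.sorted_pairwise t pvKey), ih, List.filter_append]
    by_cases hpx : pvPk k x = true <;> simp [hpx]

-- a nonempty cost class pins down the head' key bound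
theorem eq_of_pairwise_of_filter_eq (l₁ l₂ : List (Int × Int × Int))
    (h₁ : l₁.Pairwise (fun a b => pvKey a ≤ pvKey b)) (h₂ : l₂.Pairwise (fun a b => pvKey a ≤ pvKey b))
    (hf : ∀ k, l₁.filter (pvPk k) = l₂.filter (pvPk k)) : l₁ = l₂ := by
  induction l₁ generalizing l₂ with
  | nil =>
    cases l₂ with
    | nil => rfl
    | cons b t₂ =>
      have := hf (pvKey b)
      simp [pvPk] at this
  | cons a t₁ ih =>
    cases l₂ with
    | nil =>
      have := hf (pvKey a)
      simp [pvPk] at this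
    | cons b t₂ =>
      -- the two heads have the same key
      have hmem : ∀ (u : Int × Int × Int) (l : List (Int × Int × Int)) (k : Int),
          u ∈ l.filter (pvPk k) → u ∈ l ∧ pvKey u = k := by
        intro u l k hu
        have h1 := List.mem_filter.mp hu
        refine ⟨h1.1, ?_⟩
        have := h1.2
        unfold pvPk at this
        exact of_decide_eq_true this
      have hab : pvKey a = pvKey b := by
        have haIn : a ∈ (b :: t₂) ∧ pvKey a = pvKey a := by
          apply hmem a (b :: t₂) (pvKey a)
          rw [← hf (pvKey a)]
          simp [pvPk]
        have hbIn : b ∈ (a :: t₁) ∧ pvKey b = pvKey b := by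
          apply hmem b (a :: t₁) (pvKey b)
          rw [hf (pvKey b)]
          simp [pvPk]
        have h1 : pvKey b ≤ pvKey a := by
          rcases List.mem_cons.mp haIn.1 with rfl | h
          · exact le_refl _
          · exact (List.pairwise_cons.mp h₂).1 a h
        have h2 : pvKey a ≤ pvKey b := by
          rcases List.mem_cons.mp hbIn.1 with rfl | h
          · exact le_refl _
          · exact (List.pairwise_cons.mp h₁).1 b h
        omega
      -- heads are equal, class tails agree
      have hpa : pvPk (pvKey a) a = true := by simp [pvPk]
      have hpb : pvPk (pvKey a) b = true := by simp [pvPk, ← hab]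
      have hk := hf (pvKey a)
      simp only [List.filter_cons, hpa, hpb, if_true] at hk
      injection hk with hhead htailk
      subst hhead
      congr 1
      apply ih t₂ (List.pairwise_cons.mp h₁).2 (List.pairwise_cons.mp h₂).2
      intro k
      by_cases hka : k = pvKey a
      · rw [hka]; exact htailk
      · have := hf k
        rw [List.filter_cons, List.filter_cons] at this
        rw [if_neg (by simp [pvPk]; omega), if_neg (by simp [pvPk]; omega)] at this
        exact this

-- ===== VERDICT (by name: the statement is the Claim_ definition above) =====
theorem sort_edges_spec : Claim_equal_sort_edges := by
  intro adj _
  unfold Spec_sort_edges sort_edges sort_edges_alt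
  rw [extract_eq adj []]
  simp only [List.nil_append]
  set edges := adj.flatMap (fun kv =>
    kv.2.filterMap (fun nc => if kv.1 < nc.1 then some (kv.1, nc.1, nc.2) else none)) with hE
  apply eq_of_pairwise_of_filter_eq
  · exact pairwise_pyMergeSort edges
  · exact PySem.List.sorted_pairwise edges pvKey
  · intro k; exact (filter_pyMergeSort k edges).trans (filter_sorted k edges).symm
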